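-- pv_equiv track=rewrite | github.com/VinayShetyeOfficial/leetcode-top-150 | extras/HackerRank/pack/Check_for_non_identical_string_rotation.py | isNonTrivialRotation
-- ===== SOURCE A (Python) =====
-- def isNonTrivialRotation(s1, s2):
--     # Write your code here
--     if len(s1) != len(s2) or s1 == s2:
--         return 0
--
--     string = ''
--     for index in range(len(s1)):
--         string = s1[index: ] + s1[:index]
--         if string == s2:
--             return 1
--
--     return 0
-- ===== SOURCE B (Python) =====
-- def isNonTrivialRotation(s1, s2):
--     return 1 if len(s1) == len(s2) and s1 != s2 and s2 in s1 + s1 else 0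
-- ===== Notes on version B (the rewrite author's own statement) =====
-- stated objective: faster
-- what changed: Replaces the loop that builds and compares every rotation of s1 with a single substring test 's2 in s1+s1' (plus the length and inequality guards).
import Mathlib
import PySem

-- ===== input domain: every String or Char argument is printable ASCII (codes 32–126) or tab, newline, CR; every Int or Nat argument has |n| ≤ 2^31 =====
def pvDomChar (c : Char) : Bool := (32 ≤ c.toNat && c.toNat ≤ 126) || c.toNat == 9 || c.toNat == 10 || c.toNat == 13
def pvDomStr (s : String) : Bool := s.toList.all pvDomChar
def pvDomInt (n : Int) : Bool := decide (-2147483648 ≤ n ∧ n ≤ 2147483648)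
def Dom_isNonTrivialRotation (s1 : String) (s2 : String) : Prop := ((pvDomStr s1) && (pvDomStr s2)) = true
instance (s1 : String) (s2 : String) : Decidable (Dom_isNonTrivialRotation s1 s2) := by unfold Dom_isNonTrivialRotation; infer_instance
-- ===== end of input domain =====

-- B replaces A's O(n^2) try-every-rotation loop by the single substring test 's2 in s1+s1' (asymptotically faster).

-- ===== PORT A =====
-- the for-loop with early 'return 1'; string = s1[index:] + s1[:index]
def isNTRLoop (l1 l2 : List Char) : List Int → Int
  | [] => 0
  | i :: rest =>
      if PySem.List.slice l1 (some i) none ++ PySem.List.slice l1 none (some i) = l2 then 1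
      else isNTRLoop l1 l2 rest

def isNonTrivialRotation (s1 : String) (s2 : String) : Int :=
  let l1 := s1.toList
  let l2 := s2.toList
  if l1.length ≠ l2.length ∨ l1 = l2 then 0
  else isNTRLoop l1 l2 (PySem.List.pyRange 0 (l1.length : Int) 1)

-- ===== PORT B =====
def isNonTrivialRotation_alt (s1 : String) (s2 : String) : Int :=
  let l1 := s1.toList
  let l2 := s2.toList
  if l1.length = l2.length ∧ l1 ≠ l2 ∧ PySem.Chars.isIn l2 (l1 ++ l1) then 1 else 0

-- ===== PRECONDITION & SPEC =====
def Spec_isNonTrivialRotation (s1 : String) (s2 : String) (out : Int) : Prop := out = isNonTrivialRotation_alt s1 s2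
instance (s1 : String) (s2 : String) (out : Int) : Decidable (Spec_isNonTrivialRotation s1 s2 out) := by unfold Spec_isNonTrivialRotation; infer_instance

-- ===== CLAIM (what is proved, stated in full; the proofs are below) =====
def Claim_equal_isNonTrivialRotation : Prop := ∀ (s1 : String) (s2 : String), Dom_isNonTrivialRotation s1 s2 → Spec_isNonTrivialRotation s1 s2 (isNonTrivialRotation s1 s2)

-- ===== LEMMAS AND PROOFS =====

-- A's loop returns 1 exactly when some index in the list gives the rotation l2
theorem isNTRLoop_eq_one_iff (l1 l2 : List Char) (idxs : List Int) :
    isNTRLoop l1 l2 idxs =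
      (if ∃ i ∈ idxs, PySem.List.slice l1 (some i) none ++ PySem.List.slice l1 none (some i) = l2 then 1 else 0) := by
  induction idxs with
  | nil => simp [isNTRLoop]
  | cons i rest ih =>
      simp only [isNTRLoop, ih, List.mem_cons]
      by_cases h : PySem.List.slice l1 (some i) none ++ PySem.List.slice l1 none (some i) = l2
      · simp [h]
      · by_cases h2 : ∃ j ∈ rest, PySem.List.slice l1 (some j) none ++ PySem.List.slice l1 none (some j) = l2
        · simp [h, h2]
        · simp [h, h2]

-- the substring test on l1 ++ l1 is exactly "some rotation of l1 equals l2" (lengths equal, l1 ≠ l2)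
theorem rot_iff (l1 l2 : List Char) (hlen : l1.length = l2.length) (hne : l1 ≠ l2) :
    (l2 <:+: l1 ++ l1) ↔ ∃ k : Nat, k < l1.length ∧ l1.drop k ++ l1.take k = l2 := by
  constructor
  · rintro ⟨t, u, htu⟩
    have hlen2 : t.length + (l2.length + u.length) = l1.length + l1.length := by
      have := congrArg List.length htu
      simpa [List.length_append, Nat.add_assoc] using this
    have hk : t.length ≤ l1.length := by omega
    have hl2 : l2 = ((l1 ++ l1).drop t.length).take l2.length := by
      have : (l1 ++ l1).drop t.length = l2 ++ u := by
        rw [← htu, List.append_assoc, List.drop_left]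
      rw [this, List.take_append_of_le_length (le_refl _), List.take_length]
    have hrot : ((l1 ++ l1).drop t.length).take l2.length
        = l1.drop t.length ++ l1.take t.length := by
      rw [List.drop_append_of_le_length hk]
      rw [List.take_append]
      congr 1
      · rw [List.take_of_length_le]
        simp [List.length_drop]; omega
      · congr 1
        simp [List.length_drop]; omega
    rcases Nat.lt_or_ge t.length l1.length with hlt | hge
    · exact ⟨t.length, hlt, by rw [← hrot, ← hl2]⟩
    · exfalso
      have he : t.length = l1.length := le_antisymm hk hge
      apply hne
      rw [hl2, hrot, he]
      simp
  · rintro ⟨k, hk, hrot⟩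
    refine ⟨l1.take k, l1.drop k, ?_⟩
    rw [← hrot]
    simp only [← List.append_assoc, List.take_append_drop]
    rw [List.append_assoc, List.take_append_drop]

-- ===== VERDICT (by name: the statement is the Claim_ definition above) =====
theorem isNonTrivialRotation_spec : Claim_equal_isNonTrivialRotation := by
  intro s1 s2 _
  unfold Spec_isNonTrivialRotation isNonTrivialRotation isNonTrivialRotation_alt
  set l1 := s1.toList with hl1
  set l2 := s2.toList with hl2
  by_cases hguard : l1.length ≠ l2.length ∨ l1 = l2
  · rw [if_pos hguard]
    rcases hguard with h | h
    · simp [h]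
    · simp [h]
  · push Not at hguard
    obtain ⟨hlen, hne⟩ := hguard
    rw [if_neg (by push Not; exact ⟨hlen, hne⟩)]
    rw [isNTRLoop_eq_one_iff]
    have hiff : (∃ i ∈ PySem.List.pyRange 0 (l1.length : Int) 1,
        PySem.List.slice l1 (some i) none ++ PySem.List.slice l1 none (some i) = l2)
        ↔ PySem.Chars.isIn l2 (l1 ++ l1) = true := by
      rw [PySem.Chars.isIn_iff_infix, rot_iff l1 l2 hlen hne]
      constructor
      · rintro ⟨i, hmem, heq⟩
        rw [PySem.List.mem_pyRange_iff_of_pos (by norm_num)] at hmem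
        obtain ⟨h0, hi, -⟩ := hmem
        obtain ⟨k, rfl⟩ : ∃ k : Nat, i = (k : Int) := ⟨i.toNat, (Int.toNat_of_nonneg h0).symm⟩
        refine ⟨k, by exact_mod_cast hi, ?_⟩
        rwa [PySem.List.slice_from_natCast, PySem.List.slice_to_natCast] at heq
      · rintro ⟨k, hk, heq⟩
        refine ⟨(k : Int), ?_, ?_⟩
        · rw [PySem.List.mem_pyRange_iff_of_pos (by norm_num)]
          refine ⟨by positivity, by exact_mod_cast hk, one_dvd _⟩
        · rwa [PySem.List.slice_from_natCast, PySem.List.slice_to_natCast]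
    by_cases hin : PySem.Chars.isIn l2 (l1 ++ l1) = true
    · rw [if_pos (hiff.mpr hin), if_pos ⟨hlen, hne, hin⟩]
    · rw [if_neg (fun h => hin (hiff.mp h)), if_neg (by simp [hin])]
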